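-- pv_equiv track=rewrite | github.com/SPOC-group/numerics_integer_traffic_assignment | algorithms/RITAP_variants/frank_wolfe_optimizer_paths_v2highM.py | starts_ends_to_origin_bush
-- ===== SOURCE A (Python) =====
-- def starts_ends_to_origin_bush(start_nodes, end_nodes):
--     """
--     This function converts the two lists start_nodes and end_nodes into a different data structure that collects all the paths with a commom start node.
--
--
--     A bush is a set of start-end pairs with a common start node. The data structure to represent many bushes is the following
--
--     {s1 : {e1_s1 : w_s1e1, e2_s1 : w_s1e2,...}, s2 : {e1_s2 : w_s2e1, e2_s2 : w_s2e2,...}, ...}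
--     s are the start nodes
--     e_s are the various end nodes corresponding to a start node s
--     w_se is the number of paths going from s to e.
--     The advantage of this data structure is the following: dijkstra computes the shortest paths from one start node to all possible end nodes. Therefore grouping the paths by start node we reduce the number fo calls to dijkstra.
--     The ordering of the paths is lost in this new representation.
--     """
--     bushes = {}
--
--     for start, end in zip(start_nodes, end_nodes):
--         if start in bushes:
--             if end in bushes[start]:
--                 bushes[start][end] = bushes[start][end] + 1
--             else:
--                 bushes[start][end] = 1
--         else:
--             bushes[start] = {end: 1}
--
--     return bushes
-- ===== SOURCE B (Python) =====
-- def starts_ends_to_origin_bush(start_nodes, end_nodes):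
--     """Count (start, end) pairs in one flat pass, then regroup the pair
--     counts into the nested bush dict in a second pass."""
--     pair_counts = {}
--     for pair in zip(start_nodes, end_nodes):
--         pair_counts[pair] = pair_counts.get(pair, 0) + 1
--     bushes = {}
--     for (start, end), count in pair_counts.items():
--         if start not in bushes:
--             bushes[start] = {}
--         bushes[start][end] = count
--     return bushes
-- ===== Notes on version B (the rewrite author's own statement) =====
-- stated objective: alternative
-- what changed: B first builds a flat count table over (start,end) pairs in one pass, then regroups that table into the nested dict in a second pass, instead of A's single scan that nests and increments incrementally.
import Mathlib
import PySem

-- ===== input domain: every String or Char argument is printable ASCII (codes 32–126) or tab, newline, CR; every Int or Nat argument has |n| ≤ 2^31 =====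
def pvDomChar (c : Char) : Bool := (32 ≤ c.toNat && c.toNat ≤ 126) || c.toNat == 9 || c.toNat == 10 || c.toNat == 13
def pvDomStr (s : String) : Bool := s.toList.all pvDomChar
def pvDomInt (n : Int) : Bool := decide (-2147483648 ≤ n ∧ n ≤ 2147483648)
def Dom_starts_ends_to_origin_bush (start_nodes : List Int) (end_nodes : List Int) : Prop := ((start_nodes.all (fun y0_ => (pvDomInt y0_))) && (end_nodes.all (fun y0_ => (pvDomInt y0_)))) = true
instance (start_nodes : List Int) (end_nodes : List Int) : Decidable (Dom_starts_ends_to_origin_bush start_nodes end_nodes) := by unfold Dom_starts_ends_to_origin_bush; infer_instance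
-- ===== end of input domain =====

-- B replaces A's single incrementally-nesting scan by a flat (start,end) pair count pass
-- followed by a separate regrouping pass (objective: alternative decomposition, same cost).

-- ===== PORT A =====
-- single scan over zip(start_nodes, end_nodes), nesting and incrementing in place
def starts_ends_to_origin_bush (start_nodes : List Int) (end_nodes : List Int) : List (Int × List (Int × Int)) :=
  let bushes : PySem.Dict Int (PySem.Dict Int Int) :=
    (start_nodes.zip end_nodes).foldl (fun b pr =>
      if b.contains pr.1 then
        let inner := b.getD pr.1 PySem.Dict.empty
        if inner.contains pr.2 then
          b.insert pr.1 (inner.insert pr.2 (inner.getD pr.2 0 + 1))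
        else
          b.insert pr.1 (inner.insert pr.2 1)
      else
        b.insert pr.1 (PySem.Dict.ofList [(pr.2, 1)])) PySem.Dict.empty
  bushes.items.map (fun pr => (pr.1, pr.2.items))

-- ===== PORT B =====
-- pass 1: flat pair count; pass 2: regroup the count table into the nested dict
def starts_ends_to_origin_bush_alt (start_nodes : List Int) (end_nodes : List Int) : List (Int × List (Int × Int)) :=
  let pair_counts : PySem.Dict (Int × Int) Int :=
    (start_nodes.zip end_nodes).foldl (fun d pr => d.insert pr (d.getD pr 0 + 1)) PySem.Dict.empty
  let bushes : PySem.Dict Int (PySem.Dict Int Int) :=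
    pair_counts.items.foldl (fun b q =>
      let b1 := if b.contains q.1.1 then b else b.insert q.1.1 PySem.Dict.empty
      b1.insert q.1.1 ((b1.getD q.1.1 PySem.Dict.empty).insert q.1.2 q.2)) PySem.Dict.empty
  bushes.items.map (fun pr => (pr.1, pr.2.items))

-- ===== PRECONDITION & SPEC =====
def Spec_starts_ends_to_origin_bush (start_nodes : List Int) (end_nodes : List Int) (out : List (Int × List (Int × Int))) : Prop := out = starts_ends_to_origin_bush_alt start_nodes end_nodes
instance (start_nodes : List Int) (end_nodes : List Int) (out : List (Int × List (Int × Int))) : Decidable (Spec_starts_ends_to_origin_bush start_nodes end_nodes out) := by unfold Spec_starts_ends_to_origin_bush; infer_instance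

-- ===== CLAIM (what is proved, stated in full; the proofs are below) =====
def Claim_equal_starts_ends_to_origin_bush : Prop := ∀ (start_nodes : List Int) (end_nodes : List Int), Dom_starts_ends_to_origin_bush start_nodes end_nodes → Spec_starts_ends_to_origin_bush start_nodes end_nodes (starts_ends_to_origin_bush start_nodes end_nodes)

-- ===== LEMMAS AND PROOFS =====

-- Proof-side names for the two loop bodies (pvStepA' is pvStepA in uniform insert form).
def pvStepA (b : PySem.Dict Int (PySem.Dict Int Int)) (pr : Int × Int) : PySem.Dict Int (PySem.Dict Int Int) :=
  if b.contains pr.1 then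
    let inner := b.getD pr.1 PySem.Dict.empty
    if inner.contains pr.2 then
      b.insert pr.1 (inner.insert pr.2 (inner.getD pr.2 0 + 1))
    else
      b.insert pr.1 (inner.insert pr.2 1)
  else
    b.insert pr.1 (PySem.Dict.ofList [(pr.2, 1)])
def pvStepA' (b : PySem.Dict Int (PySem.Dict Int Int)) (pr : Int × Int) : PySem.Dict Int (PySem.Dict Int Int) :=
  b.insert pr.1 ((b.getD pr.1 PySem.Dict.empty).insert pr.2 ((b.getD pr.1 PySem.Dict.empty).getD pr.2 0 + 1))
lemma pvStepA_eq (b : PySem.Dict Int (PySem.Dict Int Int)) (pr : Int × Int) :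
    pvStepA b pr = pvStepA' b pr := by
  unfold pvStepA pvStepA'
  by_cases hc : b.contains pr.1 = true
  · by_cases hce : (b.getD pr.1 PySem.Dict.empty).contains pr.2 = true
    · simp [hc, hce]
    · simp [hc, hce,
        PySem.Dict.getD_of_not_contains (b.getD pr.1 PySem.Dict.empty) 0 (by simpa using hce)]
  · simp [hc, PySem.Dict.getD_of_not_contains b PySem.Dict.empty (by simpa using hc)]
    rfl
lemma pv_insert_comm {κ ν : Type} [BEq κ] [LawfulBEq κ] (d : PySem.Dict κ ν) (k k' : κ) (v : ν) (w : ν)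
    (hc : d.contains k = true) (hne : k' ≠ k) :
    (d.insert k v).insert k' w = (d.insert k' w).insert k v := by
  apply PySem.Dict.ext
  by_cases hc' : d.contains k' = true
  · rw [PySem.Dict.items_insert_of_contains _ _ (by rw [PySem.Dict.contains_insert]; simp [hc']),
      PySem.Dict.items_insert_of_contains _ _ hc,
      PySem.Dict.items_insert_of_contains _ _ (by rw [PySem.Dict.contains_insert]; simp [hc]),
      PySem.Dict.items_insert_of_contains _ _ hc']
    simp only [List.map_map]
    apply List.map_congr_left
    intro p _
    by_cases h1 : p.1 = k <;> by_cases h2 : p.1 = k' <;>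
      simp [Function.comp, h1, h2, hne, Ne.symm hne]
  · rw [PySem.Dict.items_insert_of_not_contains _ _ (by rw [PySem.Dict.contains_insert]; simp [hc', hne]),
      PySem.Dict.items_insert_of_contains _ _ hc,
      PySem.Dict.items_insert_of_contains _ _ (by rw [PySem.Dict.contains_insert]; simp [hc]),
      PySem.Dict.items_insert_of_not_contains _ _ (by simpa using hc')]
    simp
    exact fun h => absurd h hne
def pvStepB (b : PySem.Dict Int (PySem.Dict Int Int)) (q : (Int × Int) × Int) : PySem.Dict Int (PySem.Dict Int Int) :=
  let b1 := if b.contains q.1.1 then b else b.insert q.1.1 PySem.Dict.empty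
  b1.insert q.1.1 ((b1.getD q.1.1 PySem.Dict.empty).insert q.1.2 q.2)
def pvFoldB (ips : List ((Int × Int) × Int)) (b : PySem.Dict Int (PySem.Dict Int Int)) : PySem.Dict Int (PySem.Dict Int Int) :=
  ips.foldl pvStepB b
lemma pvStepB_eq (b : PySem.Dict Int (PySem.Dict Int Int)) (q : (Int × Int) × Int) :
    pvStepB b q = b.insert q.1.1 ((b.getD q.1.1 PySem.Dict.empty).insert q.1.2 q.2) := by
  unfold pvStepB
  by_cases hc : b.contains q.1.1 = true
  · simp [hc]
  · have hcf : b.contains q.1.1 = false := by simpa using hc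
    rw [hcf]
    simp only [Bool.false_eq_true, if_false]
    rw [PySem.Dict.getD_insert_self, PySem.Dict.insert_insert_self,
      PySem.Dict.getD_of_not_contains b PySem.Dict.empty hcf]
lemma pvL3 (b : PySem.Dict Int (PySem.Dict Int Int)) (pr : Int × Int) (q : (Int × Int) × Int)
    (hq : q.1 ≠ pr) (hH : (b.getD pr.1 PySem.Dict.empty).contains pr.2 = true) :
    pvStepB (pvStepA' b pr) q = pvStepA' (pvStepB b q) pr ∧
    ((pvStepB b q).getD pr.1 PySem.Dict.empty).contains pr.2 = true := by
  have hbc : b.contains pr.1 = true := by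
    by_contra h
    rw [PySem.Dict.getD_of_not_contains b PySem.Dict.empty (by simpa using h)] at hH
    simp at hH
  have hic : (b.getD pr.1 PySem.Dict.empty).contains pr.2 = true := hH
  rw [pvStepB_eq, pvStepB_eq]
  unfold pvStepA'
  by_cases hs : q.1.1 = pr.1
  · have he : q.1.2 ≠ pr.2 := fun h => hq (Prod.ext hs h)
    constructor
    · rw [hs]
      rw [PySem.Dict.getD_insert_self, PySem.Dict.getD_insert_self,
        PySem.Dict.insert_insert_self, PySem.Dict.insert_insert_self,
        PySem.Dict.getD_insert_of_ne _ _ _ (Ne.symm he),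
        pv_insert_comm _ _ _ _ _ hic he]
    · rw [hs, PySem.Dict.getD_insert_self, PySem.Dict.contains_insert]
      simp [hic]
  · constructor
    · rw [PySem.Dict.getD_insert_of_ne _ _ _ hs,
        PySem.Dict.getD_insert_of_ne _ _ _ (Ne.symm hs),
        pv_insert_comm _ _ _ _ _ hbc hs]
    · rw [PySem.Dict.getD_insert_of_ne _ _ _ (Ne.symm hs)]
      exact hic
lemma pvL2 (ips : List ((Int × Int) × Int)) (b : PySem.Dict Int (PySem.Dict Int Int)) (pr : Int × Int)
    (hH : (b.getD pr.1 PySem.Dict.empty).contains pr.2 = true)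
    (hall : ∀ q ∈ ips, q.1 ≠ pr) :
    pvFoldB ips (pvStepA' b pr) = pvStepA' (pvFoldB ips b) pr := by
  induction ips generalizing b with
  | nil => rfl
  | cons q rest ih =>
    have hq := hall q (List.mem_cons_self)
    obtain ⟨h1, h2⟩ := pvL3 b pr q hq hH
    show pvFoldB rest (pvStepB (pvStepA' b pr) q) = pvStepA' (pvFoldB rest (pvStepB b q)) pr
    rw [h1]
    exact ih (pvStepB b q) h2 (fun q' hq' => hall q' (List.mem_cons_of_mem _ hq'))
lemma pvL4 (ips : List ((Int × Int) × Int)) (b : PySem.Dict Int (PySem.Dict Int Int)) (pr : Int × Int)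
    (hall : ∀ q ∈ ips, q.1 ≠ pr) :
    ((pvFoldB ips b).getD pr.1 PySem.Dict.empty).get? pr.2 = (b.getD pr.1 PySem.Dict.empty).get? pr.2 := by
  induction ips generalizing b with
  | nil => rfl
  | cons q rest ih =>
    have hq := hall q (List.mem_cons_self)
    show ((pvFoldB rest (pvStepB b q)).getD pr.1 PySem.Dict.empty).get? pr.2 = _
    rw [ih (pvStepB b q) (fun q' hq' => hall q' (List.mem_cons_of_mem _ hq')), pvStepB_eq]
    by_cases hs : pr.1 = q.1.1
    · have he : pr.2 ≠ q.1.2 := fun h => hq (Prod.ext hs.symm h.symm)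
      rw [hs, PySem.Dict.getD_insert_self, PySem.Dict.get?_insert_of_ne _ _ he]
    · rw [PySem.Dict.getD_insert_of_ne _ _ _ hs]
lemma pvL1 (ips : List ((Int × Int) × Int)) (b : PySem.Dict Int (PySem.Dict Int Int)) (pr : Int × Int) (c : Int)
    (hnd : (ips.map (·.1)).Nodup) (hmem : (pr, c) ∈ ips) :
    pvFoldB (ips.map (fun q => if q.1 == pr then (pr, c + 1) else q)) b = pvStepA' (pvFoldB ips b) pr := by
  induction ips generalizing b with
  | nil => simp at hmem
  | cons q rest ih =>
    rw [List.map_cons, List.nodup_cons] at hnd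
    by_cases hqp : q.1 = pr
    · have hqeq : q = (pr, c) := by
        rcases List.mem_cons.mp hmem with h | h
        · exact h.symm
        · exact absurd (List.mem_map_of_mem h) (hqp ▸ hnd.1)
      subst hqeq
      have hrest : ∀ q' ∈ rest, q'.1 ≠ pr := by
        intro q' hq' h
        exact hnd.1 (List.mem_map.mpr ⟨q', hq', h⟩)
      have hmapid : rest.map (fun q => if q.1 == pr then (pr, c + 1) else q) = rest := by
        rw [List.map_congr_left (g := id) (fun a ha => by simp [hrest a ha]), List.map_id]
      simp only [List.map_cons, beq_self_eq_true, hmapid]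
      show pvFoldB rest (pvStepB b (pr, c + 1)) = pvStepA' (pvFoldB rest (pvStepB b (pr, c))) pr
      have hstep : pvStepB b (pr, c + 1) = pvStepA' (pvStepB b (pr, c)) pr := by
        rw [pvStepB_eq, pvStepB_eq]
        unfold pvStepA'
        rw [PySem.Dict.getD_insert_self, PySem.Dict.getD_insert_self,
          PySem.Dict.insert_insert_self, PySem.Dict.insert_insert_self]
      have hH : ((pvStepB b (pr, c)).getD pr.1 PySem.Dict.empty).contains pr.2 = true := by
        rw [pvStepB_eq, PySem.Dict.getD_insert_self]
        exact PySem.Dict.contains_insert_self _ _ _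
      rw [hstep]
      exact pvL2 rest (pvStepB b (pr, c)) pr hH hrest
    · have hmem' : (pr, c) ∈ rest := by
        rcases List.mem_cons.mp hmem with h | h
        · exact absurd (by rw [← h]) hqp
        · exact h
      rw [List.map_cons, if_neg (by simpa using hqp)]
      show pvFoldB (rest.map _) (pvStepB b q) = pvStepA' (pvFoldB rest (pvStepB b q)) pr
      exact ih (pvStepB b q) hnd.2 hmem'
def pvC (l : List (Int × Int)) : PySem.Dict (Int × Int) Int :=
  l.foldl (fun d pr => d.insert pr (d.getD pr 0 + 1)) PySem.Dict.empty
lemma pvMain (l : List (Int × Int)) :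
    l.foldl pvStepA PySem.Dict.empty = pvFoldB (pvC l).items PySem.Dict.empty := by
  induction l using List.reverseRecOn with
  | nil => rfl
  | append_singleton l p ih =>
    rw [List.foldl_append, List.foldl_cons, List.foldl_nil, pvStepA_eq, ih]
    have hCapp : pvC (l ++ [p]) = (pvC l).insert p ((pvC l).getD p 0 + 1) := by
      unfold pvC; rw [List.foldl_append]; rfl
    have hnd : (pvC l).keys.Nodup := by
      unfold pvC
      exact PySem.Dict.nodup_keys_foldl_insert _ _ _ (by simp [PySem.Dict.keys_empty])
    by_cases hc : (pvC l).contains p = true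
    · obtain ⟨c, hcget⟩ : ∃ c, (pvC l).get? p = some c := by
        cases hget : (pvC l).get? p with
        | none => rw [PySem.Dict.get?_eq_none_iff_contains] at hget; simp [hc] at hget
        | some c => exact ⟨c, rfl⟩
      have hgd : (pvC l).getD p 0 = c := PySem.Dict.getD_of_get?_eq_some _ _ hcget
      have hmem : (p, c) ∈ (pvC l).items := PySem.Dict.mem_items_of_get?_eq_some _ hcget
      rw [hCapp, PySem.Dict.items_insert_of_contains _ _ hc, hgd]
      exact (pvL1 (pvC l).items PySem.Dict.empty p c hnd hmem).symm
    · have hcf : (pvC l).contains p = false := by simpa using hc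
      have h0 : (pvC l).getD p 0 = 0 := PySem.Dict.getD_of_not_contains _ _ hcf
      rw [hCapp, PySem.Dict.items_insert_of_not_contains _ _ hcf, h0]
      have hall : ∀ q ∈ (pvC l).items, q.1 ≠ p := by
        intro q hq h
        exact absurd ((pvC l).contains_iff_mem_keys p |>.mpr
          (h ▸ PySem.Dict.mem_keys_of_mem_items _ hq)) (by simp [hcf])
      have h4 := pvL4 (pvC l).items PySem.Dict.empty p hall
      apply Eq.symm
      show pvFoldB ((pvC l).items ++ [(p, 0 + 1)]) PySem.Dict.empty = _
      unfold pvFoldB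
      rw [List.foldl_append, List.foldl_cons, List.foldl_nil, pvStepB_eq]
      unfold pvStepA'
      have hg : ((pvFoldB (pvC l).items PySem.Dict.empty).getD p.1 PySem.Dict.empty).getD p.2 0 = 0 := by
        apply PySem.Dict.getD_of_get?_eq_none
        rw [h4]
        simp [PySem.Dict.getD_of_not_contains, PySem.Dict.get?_empty]
      simp only [pvFoldB] at hg
      rw [hg]

-- ===== VERDICT (by name: the statement is the Claim_ definition above) =====
theorem starts_ends_to_origin_bush_spec : Claim_equal_starts_ends_to_origin_bush := by
  intro sn en _
  unfold Spec_starts_ends_to_origin_bush starts_ends_to_origin_bush starts_ends_to_origin_bush_alt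
  exact congrArg (fun d : PySem.Dict Int (PySem.Dict Int Int) => d.items.map (fun pr => (pr.1, pr.2.items))) (pvMain (sn.zip en))
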